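-- pv_equiv track=rewrite | github.com/agneswendt/aoc24 | 3.py | split_seg
-- ===== SOURCE A (Python) =====
-- def split_seg(data):
--     enabled = True
--     res = []
--     line = "".join(data)
--     while line:
--         if enabled:
--             r1 = line.split("don't()")
--             res.append(r1[0])
--             enabled = False
--             line = "don't()".join(r1[1:])
--         else:
--             r1 = line.split("do()")
--             enabled = True
--             line = "do()".join(r1[1:])
--     return res
-- ===== SOURCE B (Python) =====
-- def split_seg(data):
--     line = "".join(data)
--     n = len(line)
--     res = []
--     pos = 0
--     enabled = True
--     while pos < n:
--         if enabled:
--             i = line.find("don't()", pos)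
--             if i == -1:
--                 res.append(line[pos:])
--                 return res
--             res.append(line[pos:i])
--             pos = i + 7
--             enabled = False
--         else:
--             i = line.find("do()", pos)
--             if i == -1:
--                 return res
--             pos = i + 4
--             enabled = True
--     return res
-- ===== Notes on version B (the rewrite author's own statement) =====
-- stated objective: alternative
-- what changed: Replaces A's repeated split/re-join of the whole remaining string at each marker with a single pass that advances a position cursor using str.find and slices each enabled segment out directly.
import Mathlib
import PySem

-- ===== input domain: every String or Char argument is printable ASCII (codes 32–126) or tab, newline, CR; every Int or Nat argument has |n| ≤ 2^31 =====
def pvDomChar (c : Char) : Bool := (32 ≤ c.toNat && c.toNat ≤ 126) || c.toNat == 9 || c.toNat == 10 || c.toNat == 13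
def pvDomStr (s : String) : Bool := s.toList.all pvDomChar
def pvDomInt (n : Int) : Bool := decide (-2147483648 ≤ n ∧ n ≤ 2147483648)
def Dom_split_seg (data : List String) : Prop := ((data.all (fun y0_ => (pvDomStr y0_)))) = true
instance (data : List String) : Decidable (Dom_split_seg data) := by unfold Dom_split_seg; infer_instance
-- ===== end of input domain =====

-- B replaces A's repeated split/re-join of the whole remaining string per marker with a
-- single pass that advances a cursor via str.find and slices enabled segments out.

-- ===== PORT A =====
-- A's while loop; fuel = line.length + 1 is a totality guard only (each iteration strictly
-- shortens the nonempty line, so the fuel is never exhausted — proved below in splitA_eq_ref).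
def splitA (fuel : Nat) (line : List Char) (enabled : Bool) (res : List String) : List String :=
  match fuel with
  | 0 => res
  | fuel + 1 =>
    match line with
    | [] => res
    | _ :: _ =>
      if enabled then
        let r1 := PySem.Chars.splitOn line "don't()".toList
        -- r1[0]: splitOn never returns []; headD [] is exact here
        splitA fuel (PySem.Chars.join "don't()".toList r1.tail) false
          (res ++ [String.ofList (r1.headD [])])
      else
        let r1 := PySem.Chars.splitOn line "do()".toList
        splitA fuel (PySem.Chars.join "do()".toList r1.tail) true res

def split_seg (data : List String) : List String :=
  let line := (PySem.Str.join "" data).toList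
  splitA (line.length + 1) line true []

-- ===== PORT B =====
-- B's while loop; fuel = n + 1 is a totality guard only (pos strictly increases each
-- iteration while pos < n, proved below in splitB_eq_ref).
def splitB (fuel : Nat) (line : List Char) (n : Nat) (pos : Nat) (enabled : Bool)
    (res : List String) : List String :=
  match fuel with
  | 0 => res
  | fuel + 1 =>
    if pos < n then
      if enabled then
        let i := PySem.Chars.findFrom line "don't()".toList (pos : Int)
        if i = -1 then
          res ++ [String.ofList (PySem.Chars.slice line (some (pos : Int)) none)]
        else
          splitB fuel line n (i.toNat + 7) false
            (res ++ [String.ofList (PySem.Chars.slice line (some (pos : Int)) (some i))])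
      else
        let i := PySem.Chars.findFrom line "do()".toList (pos : Int)
        if i = -1 then res
        else splitB fuel line n (i.toNat + 4) true res
    else res

def split_seg_alt (data : List String) : List String :=
  let line := (PySem.Str.join "" data).toList
  let n := line.length
  splitB (n + 1) line n 0 true []

-- ===== PRECONDITION & SPEC =====
def Spec_split_seg (data : List String) (out : List String) : Prop := out = split_seg_alt data
instance (data : List String) (out : List String) : Decidable (Spec_split_seg data out) := by
  unfold Spec_split_seg; infer_instance

-- ===== CLAIM (what is proved, stated in full; the proofs are below) =====
def Claim_equal_split_seg : Prop := ∀ (data : List String), Dom_split_seg data → Spec_split_seg data (split_seg data)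

-- ===== LEMMAS AND PROOFS =====

-- reference function: the sequence of enabled segments of s, used as the common meaning of both loops
def refSeg (s : List Char) (enabled : Bool) : List String :=
  if _hs : s = [] then []
  else match enabled with
  | true =>
    if h : "don't()".toList <:+: s then
      String.ofList (s.take (PySem.Chars.find s "don't()".toList).toNat) ::
        refSeg (s.drop ((PySem.Chars.find s "don't()".toList).toNat + 7)) false
    else [String.ofList s]
  | false =>
    if h : "do()".toList <:+: s then
      refSeg (s.drop ((PySem.Chars.find s "do()".toList).toNat + 4)) true
    else []
termination_by s.length
decreasing_by
  · simp only [List.length_drop]; cases s with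
    | nil => exact absurd rfl _hs
    | cons a t => simp
  · simp only [List.length_drop]; cases s with
    | nil => exact absurd rfl _hs
    | cons a t => simp

theorem refSeg_nil (e : Bool) : refSeg [] e = [] := by
  conv_lhs => rw [refSeg.eq_def]
  rw [dif_pos rfl]

theorem refSeg_true_occ (s : List Char) (hs : s ≠ []) (hocc : "don't()".toList <:+: s) :
    refSeg s true = String.ofList (s.take (PySem.Chars.find s "don't()".toList).toNat) ::
      refSeg (s.drop ((PySem.Chars.find s "don't()".toList).toNat + 7)) false := by
  conv_lhs => rw [refSeg.eq_def]
  rw [dif_neg hs]; exact dif_pos hocc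

theorem refSeg_true_no (s : List Char) (hs : s ≠ []) (hocc : ¬ "don't()".toList <:+: s) :
    refSeg s true = [String.ofList s] := by
  conv_lhs => rw [refSeg.eq_def]
  rw [dif_neg hs]; exact dif_neg hocc

theorem refSeg_false_occ (s : List Char) (hs : s ≠ []) (hocc : "do()".toList <:+: s) :
    refSeg s false = refSeg (s.drop ((PySem.Chars.find s "do()".toList).toNat + 4)) true := by
  conv_lhs => rw [refSeg.eq_def]
  rw [dif_neg hs]; exact dif_pos hocc

theorem refSeg_false_no (s : List Char) (hs : s ≠ []) (hocc : ¬ "do()".toList <:+: s) :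
    refSeg s false = [] := by
  conv_lhs => rw [refSeg.eq_def]
  rw [dif_neg hs]; exact dif_neg hocc

-- splitOn.go: the accumulator is prepended (reversed) to the result
theorem go_acc (sep : List Char) (fuel : Nat) (l cur : List Char) (acc : List (List Char)) :
    PySem.Chars.splitOn.go sep fuel l cur acc = acc.reverse ++ PySem.Chars.splitOn.go sep fuel l cur [] := by
  induction fuel generalizing l cur acc with
  | zero => simp [PySem.Chars.splitOn.go.eq_1]
  | succ fuel ih =>
    cases l with
    | nil => simp [PySem.Chars.splitOn.go.eq_2 sep (fuel+1) _ _ (by omega)]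
    | cons c rest =>
      rw [PySem.Chars.splitOn.go.eq_3, PySem.Chars.splitOn.go.eq_3]
      split
      · rw [ih _ _ (cur.reverse :: acc), ih _ _ [cur.reverse]]; simp
      · exact ih _ _ _

-- splitOn.go does not depend on the fuel once it exceeds the input length (sep nonempty)
theorem go_fuel (sep : List Char) (hsep : sep ≠ []) :
    ∀ m (l : List Char), l.length ≤ m → ∀ fuel fuel' cur acc, l.length < fuel → l.length < fuel' →
    PySem.Chars.splitOn.go sep fuel l cur acc = PySem.Chars.splitOn.go sep fuel' l cur acc := by
  intro m
  induction m with
  | zero =>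
    intro l hl fuel fuel' cur acc h1 h2
    have : l = [] := List.eq_nil_of_length_eq_zero (by omega)
    subst this
    rw [PySem.Chars.splitOn.go.eq_2 sep fuel _ _ (by omega),
        PySem.Chars.splitOn.go.eq_2 sep fuel' _ _ (by omega)]
  | succ m ih =>
    intro l hl fuel fuel' cur acc h1 h2
    cases l with
    | nil =>
      rw [PySem.Chars.splitOn.go.eq_2 sep fuel _ _ (by omega),
          PySem.Chars.splitOn.go.eq_2 sep fuel' _ _ (by omega)]
    | cons c rest =>
      obtain ⟨f1, rfl⟩ : ∃ f1, fuel = f1 + 1 := ⟨fuel - 1, by omega⟩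
      obtain ⟨f2, rfl⟩ : ∃ f2, fuel' = f2 + 1 := ⟨fuel' - 1, by omega⟩
      rw [PySem.Chars.splitOn.go.eq_3, PySem.Chars.splitOn.go.eq_3]
      split
      · rename_i hpre
        have hlen : sep.length ≤ (c :: rest).length := (List.isPrefixOf_iff_prefix.mp hpre).length_le
        have hsl : 1 ≤ sep.length := by cases sep with | nil => exact absurd rfl hsep | cons _ _ => simp
        apply ih
        · simp at hl ⊢; omega
        · simp at h1 ⊢; omega
        · simp at h2 ⊢; omega
      · apply ih <;> simp at hl h1 h2 ⊢ <;> omega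

-- no occurrence of sep: splitOn returns the whole string as its single piece
theorem go_no_occ (sep : List Char) :
    ∀ (l cur : List Char) (acc : List (List Char)) fuel, l.length < fuel → ¬ sep <:+: l →
    PySem.Chars.splitOn.go sep fuel l cur acc = acc.reverse ++ [cur.reverse ++ l] := by
  intro l
  induction l with
  | nil =>
    intro cur acc fuel hf _
    rw [PySem.Chars.splitOn.go.eq_2 sep fuel _ _ (by omega)]; simp
  | cons c rest ih =>
    intro cur acc fuel hf hocc
    obtain ⟨f1, rfl⟩ : ∃ f1, fuel = f1 + 1 := ⟨fuel - 1, by omega⟩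
    rw [PySem.Chars.splitOn.go.eq_3]
    split
    · rename_i hpre
      exact absurd ((List.isPrefixOf_iff_prefix.mp hpre).isInfix) hocc
    · rw [ih (c :: cur) acc f1 (by simp at hf ⊢; omega)
        (fun h => hocc (List.infix_cons h))]
      simp
    
theorem splitOn_no_occ (sep : List Char) (l : List Char) (hocc : ¬ sep <:+: l) :
    PySem.Chars.splitOn l sep = [l] := by
  unfold PySem.Chars.splitOn
  rw [go_no_occ sep l [] [] (l.length + 1) (by omega) hocc]; simp

theorem go_first (sep : List Char) (hsep : sep ≠ []) :
    ∀ (k : Nat) (l cur : List Char) (acc : List (List Char)) (fuel : Nat), l.length < fuel →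
    (∀ j < k, ¬ sep <+: l.drop j) → sep <+: l.drop k →
    PySem.Chars.splitOn.go sep fuel l cur acc =
      acc.reverse ++ (cur.reverse ++ l.take k) :: PySem.Chars.splitOn (l.drop (k + sep.length)) sep := by
  intro k
  induction k with
  | zero =>
    intro l cur acc fuel hf _ hk
    simp only [List.drop_zero] at hk
    have hsl : 1 ≤ sep.length := by cases sep with | nil => exact absurd rfl hsep | cons _ _ => simp
    cases l with
    | nil => exact absurd (List.prefix_nil.mp hk) hsep
    | cons c rest =>
      obtain ⟨f1, rfl⟩ : ∃ f1, fuel = f1 + 1 := ⟨fuel - 1, by omega⟩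
      rw [PySem.Chars.splitOn.go.eq_3]
      rw [if_pos (List.isPrefixOf_iff_prefix.mpr hk)]
      have hlen : sep.length ≤ (c :: rest).length := hk.length_le
      rw [go_acc]
      unfold PySem.Chars.splitOn
      simp only [Nat.zero_add]
      rw [go_fuel sep hsep (List.drop sep.length (c :: rest)).length (List.drop sep.length (c :: rest))
            (by omega) f1 ((List.drop sep.length (c :: rest)).length + 1) [] []
            (by simp at hf ⊢; omega) (by omega)]
      simp
  | succ k ih =>
    intro l cur acc fuel hf hmin hk
    have hsl : 1 ≤ sep.length := by cases sep with | nil => exact absurd rfl hsep | cons _ _ => simp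
    cases l with
    | nil =>
      simp only [List.drop_nil] at hk
      exact absurd (List.prefix_nil.mp hk) hsep
    | cons c rest =>
      obtain ⟨f1, rfl⟩ : ∃ f1, fuel = f1 + 1 := ⟨fuel - 1, by omega⟩
      rw [PySem.Chars.splitOn.go.eq_3]
      rw [if_neg (by
        intro hpre
        exact hmin 0 (by omega) (by simpa using List.isPrefixOf_iff_prefix.mp hpre))]
      rw [ih rest (c :: cur) acc f1 (by simp at hf ⊢; omega)
            (fun j hj => hmin (j + 1) (by omega))
            (by simpa using hk)]
      have hd : List.drop (k + 1 + sep.length) (c :: rest) = List.drop (k + sep.length) rest := by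
        rw [show k + 1 + sep.length = (k + sep.length) + 1 by omega]; rfl
      rw [hd]; simp

-- first occurrence of sep at index k: splitOn peels off the prefix
theorem splitOn_first (sep : List Char) (hsep : sep ≠ []) :
    ∀ (k : Nat) (l : List Char), (∀ j < k, ¬ sep <+: l.drop j) → sep <+: l.drop k →
    PySem.Chars.splitOn l sep = l.take k :: PySem.Chars.splitOn (l.drop (k + sep.length)) sep := by
  intro k l hmin hk
  unfold PySem.Chars.splitOn
  rw [go_first sep hsep k l [] [] (l.length + 1) (by omega) hmin hk]
  rfl

theorem splitOn_ne_nil (sep : List Char) (hsep : sep ≠ []) (l : List Char) :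
    PySem.Chars.splitOn l sep ≠ [] := by
  by_cases hocc : sep <:+: l
  · have hk : 0 ≤ PySem.Chars.find l sep := (PySem.Chars.find_nonneg_iff l sep).mpr hocc
    obtain ⟨h1, h2⟩ := PySem.Chars.find_spec hk
    rw [splitOn_first sep hsep _ l h2 h1]
    simp
  · rw [splitOn_no_occ sep l hocc]; simp

theorem join_splitOn (sep : List Char) (hsep : sep ≠ []) (s : List Char) :
    PySem.Chars.join sep (PySem.Chars.splitOn s sep) = s := by
  induction hn : s.length using Nat.strong_induction_on generalizing s with
  | _ n ih =>
  subst hn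
  by_cases hocc : sep <:+: s
  · have hk : 0 ≤ PySem.Chars.find s sep := (PySem.Chars.find_nonneg_iff s sep).mpr hocc
    obtain ⟨h1, h2⟩ := PySem.Chars.find_spec hk
    set k := (PySem.Chars.find s sep).toNat with hkdef
    have hsl : 1 ≤ sep.length := by cases sep with | nil => exact absurd rfl hsep | cons _ _ => simp
    have hklen : sep.length ≤ s.length - k := by
      have := h1.length_le; simp at this; omega
    have hkle : k < s.length := by
      have : s.drop k ≠ [] := fun h => hsep (List.prefix_nil.mp (h ▸ h1))
      rw [← List.length_pos_iff] at this; simp at this; omega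
    rw [splitOn_first sep hsep k s h2 h1]
    obtain ⟨h0, t0, hsplit⟩ : ∃ h0 t0, PySem.Chars.splitOn (s.drop (k + sep.length)) sep = h0 :: t0 := by
      cases hs : PySem.Chars.splitOn (s.drop (k + sep.length)) sep with
      | nil => exact absurd hs (splitOn_ne_nil sep hsep _)
      | cons h0 t0 => exact ⟨h0, t0, rfl⟩
    rw [hsplit, PySem.Chars.join_cons_cons, ← hsplit,
        ih (s.drop (k + sep.length)).length (by simp; omega) _ rfl]
    obtain ⟨t2, ht2⟩ := h1
    have hdd : s.drop (k + sep.length) = t2 := by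
      have : (s.drop k).drop sep.length = t2 := by rw [← ht2]; simp
      rw [← this, List.drop_drop]
    rw [hdd]
    conv_rhs => rw [← List.take_append_drop k s, ← ht2]
    simp
  · rw [splitOn_no_occ sep s hocc, PySem.Chars.join_singleton]

theorem splitA_nil (fuel : Nat) (e : Bool) (res : List String) : splitA fuel [] e res = res := by
  cases fuel <;> simp [splitA]

theorem splitA_eq_ref : ∀ (fuel : Nat) (s : List Char) (enabled : Bool) (res : List String),
    s.length < fuel → splitA fuel s enabled res = res ++ refSeg s enabled := by
  intro fuel
  induction fuel with
  | zero => intro s e res h; omega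
  | succ fuel ih =>
    intro s enabled res hf
    cases s with
    | nil => rw [splitA_nil, refSeg_nil]; simp
    | cons c rest =>
      cases enabled with
      | true =>
        simp only [splitA]
        by_cases hocc : "don't()".toList <:+: (c :: rest)
        · have hk0 : 0 ≤ PySem.Chars.find (c :: rest) "don't()".toList :=
            (PySem.Chars.find_nonneg_iff _ _).mpr hocc
          obtain ⟨h1, h2⟩ := PySem.Chars.find_spec hk0
          rw [splitOn_first _ (by decide) _ _ h2 h1]
          have h7 : "don't()".toList.length = 7 := by decide
          rw [h7]
          simp only [List.tail_cons, List.headD_cons]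
          rw [join_splitOn _ (by decide)]
          rw [ih _ false _ (by simp at hf ⊢; omega)]
          rw [refSeg_true_occ _ (List.cons_ne_nil c rest) hocc]
          simp only [List.append_assoc, List.singleton_append]
          rw [if_pos trivial]
        · rw [splitOn_no_occ _ _ hocc]
          simp only [List.tail_cons, List.headD_cons, PySem.Chars.join_nil]
          rw [splitA_nil, refSeg_true_no _ (List.cons_ne_nil c rest) hocc]
          rw [if_pos trivial]
      | false =>
        simp only [splitA]
        by_cases hocc : "do()".toList <:+: (c :: rest)
        · have hk0 : 0 ≤ PySem.Chars.find (c :: rest) "do()".toList :=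
            (PySem.Chars.find_nonneg_iff _ _).mpr hocc
          obtain ⟨h1, h2⟩ := PySem.Chars.find_spec hk0
          rw [splitOn_first _ (by decide) _ _ h2 h1]
          have h4 : "do()".toList.length = 4 := by decide
          rw [h4]
          simp only [List.tail_cons]
          rw [join_splitOn _ (by decide)]
          rw [ih _ true _ (by simp at hf ⊢; omega)]
          rw [refSeg_false_occ _ (List.cons_ne_nil c rest) hocc]
          rw [if_neg (by simp)]
        · rw [splitOn_no_occ _ _ hocc]
          simp only [List.tail_cons, PySem.Chars.join_nil]
          rw [splitA_nil, refSeg_false_no _ (List.cons_ne_nil c rest) hocc]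
          rw [if_neg (by simp)]
          simp

theorem splitB_eq_ref : ∀ (fuel : Nat) (line : List Char) (pos : Nat) (enabled : Bool) (res : List String),
    pos ≤ line.length → line.length + 1 - pos ≤ fuel →
    splitB fuel line line.length pos enabled res = res ++ refSeg (line.drop pos) enabled := by
  intro fuel
  induction fuel with
  | zero => intro line pos e res h1 h2; omega
  | succ fuel ih =>
    intro line pos enabled res hle hfuel
    by_cases hlt : pos < line.length
    · have hdlen : (line.drop pos).length = line.length - pos := by simp
      have hne : line.drop pos ≠ [] := by
        rw [← List.length_pos_iff]; omega
      cases enabled with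
      | true =>
        simp only [splitB, if_pos hlt]
        rw [PySem.Chars.findFrom_natCast line "don't()".toList pos hle]
        by_cases hocc : "don't()".toList <:+: line.drop pos
        · have hk0 : 0 ≤ PySem.Chars.find (line.drop pos) "don't()".toList :=
            (PySem.Chars.find_nonneg_iff _ _).mpr hocc
          obtain ⟨h1, h2⟩ := PySem.Chars.find_spec hk0
          set f := PySem.Chars.find (line.drop pos) "don't()".toList with hfdef
          set k := f.toNat with hkdef
          have hk7 : k + 7 ≤ (line.drop pos).length := by
            have := h1.length_le
            simp at this ⊢
            omega
          have hne1 : ¬ (f = -1) := by omega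
          have hne2 : ¬ ((pos : Int) + f = -1) := by omega
          rw [if_neg hne1, if_neg hne2]
          have hcast : (↑pos + f) = ((pos + k : Nat) : Int) := by push_cast; omega
          have htn : (↑pos + f).toNat = pos + k := by omega
          rw [htn, hcast]
          simp only [PySem.Chars.slice_eq_listSlice, PySem.List.slice_natCast]
          have htk : pos + k - pos = k := by omega
          rw [htk]
          rw [ih line (pos + k + 7) false _ (by omega) (by omega)]
          have hdd : line.drop (pos + k + 7) = (line.drop pos).drop (k + 7) := by
            rw [List.drop_drop]; ring_nf
          rw [hdd]
          rw [refSeg_true_occ _ hne hocc, ← hfdef, ← hkdef]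
          simp only [List.append_assoc, List.singleton_append]
          rw [if_pos trivial]
        · rw [(PySem.Chars.find_eq_neg_one_iff _ _).mpr hocc]
          simp only [PySem.Chars.slice_eq_listSlice, PySem.List.slice_from_natCast]
          rw [refSeg_true_no _ hne hocc]
          norm_num
      | false =>
        simp only [splitB, if_pos hlt]
        rw [PySem.Chars.findFrom_natCast line "do()".toList pos hle]
        by_cases hocc : "do()".toList <:+: line.drop pos
        · have hk0 : 0 ≤ PySem.Chars.find (line.drop pos) "do()".toList :=
            (PySem.Chars.find_nonneg_iff _ _).mpr hocc
          obtain ⟨h1, h2⟩ := PySem.Chars.find_spec hk0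
          set f := PySem.Chars.find (line.drop pos) "do()".toList with hfdef
          set k := f.toNat with hkdef
          have hk4 : k + 4 ≤ (line.drop pos).length := by
            have := h1.length_le
            simp at this ⊢
            omega
          have hne1 : ¬ (f = -1) := by omega
          have hne2 : ¬ ((pos : Int) + f = -1) := by omega
          rw [if_neg hne1, if_neg hne2]
          have htn : (↑pos + f).toNat = pos + k := by omega
          rw [htn]
          rw [ih line (pos + k + 4) true _ (by omega) (by omega)]
          have hdd : line.drop (pos + k + 4) = (line.drop pos).drop (k + 4) := by
            rw [List.drop_drop]; ring_nf
          rw [hdd]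
          rw [refSeg_false_occ _ hne hocc, ← hfdef, ← hkdef]
          rw [if_neg (by simp)]
        · rw [(PySem.Chars.find_eq_neg_one_iff _ _).mpr hocc]
          rw [refSeg_false_no _ hne hocc]
          norm_num
    · have hdrop : line.drop pos = [] := by
        apply List.drop_eq_nil_of_le; omega
      cases fuel with
      | zero => simp [splitB, hlt, hdrop, refSeg_nil]
      | succ f => simp [splitB, hlt, hdrop, refSeg_nil]

-- ===== VERDICT (by name: the statement is the Claim_ definition above) =====
theorem split_seg_spec : Claim_equal_split_seg := by
  intro data _
  unfold Spec_split_seg split_seg split_seg_alt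
  rw [splitA_eq_ref _ _ _ _ (by omega), splitB_eq_ref _ _ _ _ _ (by omega) (by omega)]
  simp
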